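-- pv_equiv track=rewrite | github.com/Caleb-Mitchell/code_in_place | WordGuess/word_guess_add_graphics.py | hide_characters
-- ===== SOURCE A (Python) =====
-- def hide_characters(secret_word):
--     hidden_word = []
--     for letter in secret_word:
--         if letter != "-":
--             hidden_word.append('-')
--         else:
--             hidden_word.append(letter)
--     return hidden_word
-- ===== SOURCE B (Python) =====
-- def hide_characters(secret_word):
--     return ['-'] * len(secret_word)
-- ===== Notes on version B (the rewrite author's own statement) =====
-- stated objective: simpler
-- what changed: Replaces the per-character loop (whose branch always appends '-') with a closed-form replicated list ['-'] * len(secret_word).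
import Mathlib
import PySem

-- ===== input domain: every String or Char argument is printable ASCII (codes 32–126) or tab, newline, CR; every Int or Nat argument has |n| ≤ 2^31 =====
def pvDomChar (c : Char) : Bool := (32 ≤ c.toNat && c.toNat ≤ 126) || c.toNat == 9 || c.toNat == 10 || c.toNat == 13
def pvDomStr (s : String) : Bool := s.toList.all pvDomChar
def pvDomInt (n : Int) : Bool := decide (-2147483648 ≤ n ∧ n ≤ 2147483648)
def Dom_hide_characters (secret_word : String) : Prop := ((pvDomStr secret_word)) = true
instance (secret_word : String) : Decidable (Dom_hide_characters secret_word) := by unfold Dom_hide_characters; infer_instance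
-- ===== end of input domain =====

-- B replaces the per-character loop (whose branch always appends '-') with a closed-form replicated list; objective: simpler.

-- ===== PORT A =====
def hide_characters (secret_word : String) : List String :=
  secret_word.toList.foldl
    (fun hidden_word letter =>
      if letter ≠ '-' then hidden_word ++ ["-"]
      else hidden_word ++ [String.mk [letter]]) []

-- ===== PORT B =====
def hide_characters_alt (secret_word : String) : List String :=
  List.replicate (PySem.Str.len secret_word).toNat "-"

-- ===== PRECONDITION & SPEC =====
def Spec_hide_characters (secret_word : String) (out : List String) : Prop := out = hide_characters_alt secret_word
instance (secret_word : String) (out : List String) : Decidable (Spec_hide_characters secret_word out) := by unfold Spec_hide_characters; infer_instance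

-- ===== CLAIM (what is proved, stated in full; the proofs are below) =====
def Claim_equal_hide_characters : Prop := ∀ (secret_word : String), Dom_hide_characters secret_word → Spec_hide_characters secret_word (hide_characters secret_word)

-- ===== LEMMAS AND PROOFS =====
theorem hide_chars_foldl (l : List Char) (acc : List String) :
    l.foldl (fun hidden_word letter =>
      if letter ≠ '-' then hidden_word ++ ["-"]
      else hidden_word ++ [String.mk [letter]]) acc
    = acc ++ List.replicate l.length "-" := by
  induction l generalizing acc with
  | nil => simp
  | cons c cs ih =>
    simp only [List.foldl, List.length_cons, List.replicate_succ]
    by_cases h : c = '-'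
    · subst h
      rw [if_neg (by simp), ih]
      simp
      decide
    · rw [if_pos (by simpa using h), ih]
      simp

-- ===== VERDICT (by name: the statement is the Claim_ definition above) =====
theorem hide_characters_spec : Claim_equal_hide_characters := by
  intro s _
  unfold Spec_hide_characters hide_characters hide_characters_alt
  rw [hide_chars_foldl]
  simp [PySem.Str.len]
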